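-- pv_equiv track=rewrite | github.com/alexible/door | third_one.py | occer_binary
-- ===== SOURCE A (Python) =====
-- def occer_binary(bin_list):
--     d1 = {}
--     for i in bin_list:
--         sum_ = sum(i)
--         if sum_ not in d1:
--             d1[sum_] = 0
--         d1[sum_] += 1
--     return d1
-- ===== SOURCE B (Python) =====
-- def occer_binary(bin_list):
--     xs = [sum(i) for i in bin_list]
--     pairs = []
--     while xs:
--         h = xs[0]
--         rest = [x for x in xs[1:] if x != h]
--         pairs.append((h, len(xs) - len(rest)))
--         xs = rest
--     return dict(pairs)
-- ===== Notes on version B (the rewrite author's own statement) =====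
-- stated objective: alternative
-- what changed: Replaces A's single-pass hash-dict accumulation with a partition loop: compute the sums once, then repeatedly peel the first remaining sum, strip all its occurrences by filtering, and record (sum, count) as the length difference, finally assembling the result dict from the collected pairs.
import Mathlib
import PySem

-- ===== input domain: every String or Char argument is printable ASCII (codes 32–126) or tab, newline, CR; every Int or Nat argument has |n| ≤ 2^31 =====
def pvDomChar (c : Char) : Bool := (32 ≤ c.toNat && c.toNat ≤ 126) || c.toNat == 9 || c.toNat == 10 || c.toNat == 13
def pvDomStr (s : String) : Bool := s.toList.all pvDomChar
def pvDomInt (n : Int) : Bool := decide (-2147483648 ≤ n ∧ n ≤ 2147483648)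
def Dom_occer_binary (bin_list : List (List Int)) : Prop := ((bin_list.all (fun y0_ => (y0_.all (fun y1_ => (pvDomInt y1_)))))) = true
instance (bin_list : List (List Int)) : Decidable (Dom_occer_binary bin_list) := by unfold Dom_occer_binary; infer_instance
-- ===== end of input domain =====

-- B replaces A's one-pass hash accumulation by a partition loop: repeatedly take the first
-- remaining sum, count and strip all its occurrences by filtering, and build the result
-- back from the collected (sum, count) pairs; alternative decomposition, same results.

-- ===== PORT A =====
def occer_binary (bin_list : List (List Int)) : List (Int × Int) :=
  (bin_list.foldl (fun d1 i =>
      let sum_ : Int := i.foldl (· + ·) 0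
      let d1 := if d1.contains sum_ then d1 else d1.insert sum_ 0
      d1.insert sum_ (d1.getD sum_ 0 + 1))
    PySem.Dict.empty).items

-- ===== PORT B =====
-- the 'while xs:' loop of Source B: peel the head sum, drop all its occurrences, record the pair
def pvGroup : List Int → List (Int × Int)
  | [] => []
  | h :: t =>
    let rest := t.filter (fun x => x != h)
    (h, ((h :: t).length : Int) - (rest.length : Int)) :: pvGroup rest
termination_by xs => xs.length
decreasing_by exact Nat.lt_succ_of_le (by simpa using List.length_filter_le _ t)

def occer_binary_alt (bin_list : List (List Int)) : List (Int × Int) :=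
  let xs := bin_list.map (fun i => i.foldl (· + ·) 0)
  (PySem.Dict.ofList (pvGroup xs)).items

-- ===== PRECONDITION & SPEC =====
def Spec_occer_binary (bin_list : List (List Int)) (out : List (Int × Int)) : Prop := out = occer_binary_alt bin_list
instance (bin_list : List (List Int)) (out : List (Int × Int)) : Decidable (Spec_occer_binary bin_list out) := by unfold Spec_occer_binary; infer_instance

-- ===== CLAIM (what is proved, stated in full; the proofs are below) =====
def Claim_equal_occer_binary : Prop := ∀ (bin_list : List (List Int)), Dom_occer_binary bin_list → Spec_occer_binary bin_list (occer_binary bin_list)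

-- ===== LEMMAS AND PROOFS =====

-- A's loop body ('if absent insert 0, then += 1') is exactly 'insert s (getD s 0 + 1)'
theorem occer_step_eq (d : PySem.Dict Int Int) (s : Int) :
    (let d' := if d.contains s then d else d.insert s 0
     d'.insert s (d'.getD s 0 + 1)) = d.insert s (d.getD s 0 + 1) := by
  by_cases h : d.contains s = true
  · simp [h]
  · rw [if_neg h]
    show (d.insert s 0).insert s ((d.insert s 0).getD s 0 + 1) = _
    rw [PySem.Dict.getD_insert_self, PySem.Dict.getD_of_not_contains d 0 (by simpa using h),
      PySem.Dict.insert_insert_self]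

-- the loop over bin_list is the same fold over the precomputed list of sums
theorem foldl_over_sums (l : List (List Int)) (d : PySem.Dict Int Int) :
    l.foldl (fun d1 i => d1.insert (i.foldl (· + ·) 0) (d1.getD (i.foldl (· + ·) 0) 0 + 1)) d
      = (l.map (fun i => i.foldl (· + ·) 0)).foldl
          (fun d1 s => d1.insert s (d1.getD s 0 + 1)) d := by
  induction l generalizing d with
  | nil => rfl
  | cons x xs ih => simp [List.foldl_cons, ih]

-- ofList commutes with filter (first-occurrence dedup of a filtered list)
theorem ofList_filter (p : Int → Bool) (t : List Int) :
    PySem.Set.ofList (t.filter p) = (PySem.Set.ofList t).filter p := by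
  have hdis : ∀ (s : List Int) (x : Int),
      PySem.Set.discard s x = s.filter (fun y => y != x) := fun _ _ => rfl
  induction t with
  | nil => rfl
  | cons x t ih =>
    by_cases hp : p x = true
    · rw [List.filter_cons_of_pos hp, PySem.Set.ofList_cons, PySem.Set.ofList_cons, ih,
        hdis, hdis, List.filter_cons_of_pos hp, List.filter_filter, List.filter_filter]
      exact congrArg _ (List.filter_congr fun y _ => Bool.and_comm _ _)
    · rw [List.filter_cons_of_neg hp, PySem.Set.ofList_cons, ih, hdis,
        List.filter_cons_of_neg hp, List.filter_filter]
      refine (List.filter_congr fun y _ => ?_).symm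
      by_cases hyx : y = x
      · subst hyx; simp [hp]
      · simp [bne_iff_ne, hyx]

-- dropping all occurrences of h accounts exactly for h's count
theorem length_filter_ne_add_count (h : Int) (t : List Int) :
    (t.filter (fun x => x != h)).length + t.count h = t.length := by
  induction t with
  | nil => rfl
  | cons x t ih =>
    by_cases hx : x = h
    · subst hx; simp [List.count_cons_self]; omega
    · simp [bne_iff_ne, hx, List.count_cons_of_ne hx]; omega

-- the partition loop produces exactly (first-occurrence keys, total counts)
theorem pvGroup_eq (xs : List Int) :
    pvGroup xs = (PySem.Set.ofList xs).map (fun k => (k, (xs.count k : Int))) := by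
  induction hn : xs.length using Nat.strong_induction_on generalizing xs with
  | _ n ih =>
    cases xs with
    | nil => simp [pvGroup]
    | cons h t =>
      rw [pvGroup]
      have hrest : (t.filter (fun x => x != h)).length < n := by
        subst hn
        simpa using Nat.lt_succ_of_le (List.length_filter_le _ t)
      rw [ih _ hrest (t.filter (fun x => x != h)) rfl]
      rw [PySem.Set.ofList_cons]
      show _ = (h, ((h :: t).count h : Int))
          :: ((PySem.Set.ofList t).filter (fun y => y != h)).map (fun k => (k, ((h :: t).count k : Int)))
      rw [← ofList_filter]
      congr 1
      · have := length_filter_ne_add_count h t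
        have hc : (h :: t).count h = t.count h + 1 := List.count_cons_self
        congr 1
        simp only [List.length_cons, hc]
        push_cast
        omega
      · refine List.map_congr_left fun k hk => ?_
        have hk' : k ∈ t.filter (fun x => x != h) := (PySem.Set.mem_ofList _ _).mp hk
        have hkh : k ≠ h := by
          have := List.of_mem_filter hk'
          simpa [bne_iff_ne] using this
        rw [List.count_filter (by simpa [bne_iff_ne] using hkh)]
        have hhk : ¬ h = k := fun e => hkh e.symm
        simp [hhk]

-- keys produced by pvGroup are distinct, so dict(pairs) keeps the pair list as items
theorem items_ofList_pvGroup (xs : List Int) :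
    (PySem.Dict.ofList (pvGroup xs)).items = pvGroup xs := by
  rw [show PySem.Dict.ofList (pvGroup xs)
      = (pvGroup xs).foldl (fun d p => d.insert p.1 p.2) PySem.Dict.empty from rfl]
  have h := PySem.Dict.items_foldl_insert_fresh (pvGroup xs) Prod.fst Prod.snd PySem.Dict.empty
    (fun a _ => PySem.Dict.contains_empty _) ?_
  · simpa using h
  · rw [pvGroup_eq, List.map_map]
    have : (Prod.fst ∘ fun k => (k, (xs.count k : Int))) = id := rfl
    rw [this, List.map_id]
    exact PySem.Set.nodup_ofList xs

-- ===== VERDICT (by name: the statement is the Claim_ definition above) =====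
theorem occer_binary_spec : Claim_equal_occer_binary := by
  intro bin_list _
  show occer_binary bin_list = occer_binary_alt bin_list
  unfold occer_binary occer_binary_alt
  rw [show (fun (d1 : PySem.Dict Int Int) (i : List Int) =>
        let sum_ : Int := i.foldl (· + ·) 0
        let d1 := if d1.contains sum_ then d1 else d1.insert sum_ 0
        d1.insert sum_ (d1.getD sum_ 0 + 1))
      = fun d1 i => d1.insert (i.foldl (· + ·) 0) (d1.getD (i.foldl (· + ·) 0) 0 + 1) from
        funext fun d => funext fun i => occer_step_eq d _]
  rw [foldl_over_sums]
  rw [PySem.Dict.foldl_insert_getD_add_one_eq_counter, PySem.Dict.items_counter]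
  rw [items_ofList_pvGroup, pvGroup_eq]
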